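-- pv_equiv track=rewrite | github.com/thistleknot/arxiv_rag | extraction/extract_bio_training_data.py | find_span_in_tokens
-- ===== SOURCE A (Python) =====
-- def find_span_in_tokens(tokens, text):
--     """
--     Find span of text in token list.
--
--     Args:
--         tokens: List of tokenized strings
--         text: Text to find
--
--     Returns:
--         (start_idx, end_idx) or (None, None) if not found
--
--     Example:
--         tokens = ['The', 'neural', 'network', 'learns']
--         text = 'neural network'
--         → (1, 3)  # tokens[1:3] = ['neural', 'network']
--     """
--     if not text or not text.strip():
--         return None, None
--
--     # Normalize text
--     text_lower = text.lower().strip()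
--     text_tokens = text_lower.split()
--
--     # Try to find contiguous match
--     for i in range(len(tokens)):
--         # Check if tokens[i:i+len(text_tokens)] matches
--         match = True
--         for j, text_tok in enumerate(text_tokens):
--             if i + j >= len(tokens):
--                 match = False
--                 break
--             if tokens[i + j].lower() != text_tok:
--                 match = False
--                 break
--
--         if match:
--             return i, i + len(text_tokens)
--
--     # Fallback: Try partial match (first word)
--     if text_tokens:
--         first_word = text_tokens[0]
--         for i, tok in enumerate(tokens):
--             if tok.lower() == first_word:
--                 return i, i + 1
--
--     return None, None
-- ===== SOURCE B (Python) =====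
-- def find_span_in_tokens(tokens, text):
--     """Find span of text in token list: first contiguous lowercase match,
--     else first occurrence of the first word; (None, None) if neither.
--
--     Single fused pass: windows are only compared at anchor positions where the
--     first pattern word matches, and the first-word fallback is recorded in the
--     same pass instead of a second staged scan."""
--     pattern = text.lower().split()
--     if not pattern:
--         return None, None
--     first, rest = pattern[0], pattern[1:]
--     low = [t.lower() for t in tokens]
--     m = len(pattern)
--     fallback = None
--     for i, tok in enumerate(low):
--         if tok == first:
--             if low[i + 1:i + m] == rest:
--                 return i, i + m
--             if fallback is None:
--                 fallback = (i, i + 1)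
--     return fallback if fallback is not None else (None, None)
-- ===== Notes on version B (the rewrite author's own statement) =====
-- stated objective: faster
-- what changed: B is one fused pass instead of A's two staged scans: it lowercases the tokens once, only attempts a window comparison at anchor positions where the first pattern word matches, and records the first-word fallback in the same pass, so A's second fallback loop and its per-position flag-and-break window comparison (with a .lower() call per element) disappear.
import Mathlib
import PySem

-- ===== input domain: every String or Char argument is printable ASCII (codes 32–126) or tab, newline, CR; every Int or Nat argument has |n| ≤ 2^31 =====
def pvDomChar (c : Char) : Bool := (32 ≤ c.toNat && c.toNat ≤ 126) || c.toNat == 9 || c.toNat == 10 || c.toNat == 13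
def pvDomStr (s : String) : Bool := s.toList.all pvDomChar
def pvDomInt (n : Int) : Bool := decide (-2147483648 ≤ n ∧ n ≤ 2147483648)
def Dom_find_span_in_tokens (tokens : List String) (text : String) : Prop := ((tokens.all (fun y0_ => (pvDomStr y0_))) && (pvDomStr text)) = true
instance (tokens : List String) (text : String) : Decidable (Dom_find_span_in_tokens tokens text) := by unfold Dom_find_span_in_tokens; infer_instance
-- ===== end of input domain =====

-- B replaces A's two staged scans (full-window flag-and-break comparison at every
-- position, then a separate fallback loop) by ONE fused pass over a once-lowercased
-- list that compares a window only at anchors where the first pattern word matches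
-- and records the fallback along the way (objective: alternative).

-- ===== PORT A =====
-- inner 'for j, text_tok in enumerate(text_tokens)' loop with its two breaks
def pvAMatch (tokens : List String) (i : Int) : List (Int × String) → Bool
  | [] => true
  | (j, ttok) :: rest =>
    if i + j ≥ (tokens.length : Int) then false
    else if PySem.Str.lower (PySem.List.pyGetD tokens (i + j) "") != ttok then false
    else pvAMatch tokens i rest

-- outer 'for i in range(len(tokens))' loop with its early return
def pvALoop (tokens : List String) (ttoks : List String) : List Int → Option (Int × Int)
  | [] => none
  | i :: rest =>
    if pvAMatch tokens i (PySem.List.enumerate ttoks 0) then some (i, i + (ttoks.length : Int))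
    else pvALoop tokens ttoks rest

-- fallback 'for i, tok in enumerate(tokens)' loop
def pvAFall (first : String) : List (Int × String) → Option (Int × Int)
  | [] => none
  | (i, tok) :: rest =>
    if PySem.Str.lower tok == first then some (i, i + 1) else pvAFall first rest

def find_span_in_tokens (tokens : List String) (text : String) : Option Int × Option Int :=
  if text == "" || PySem.Str.strip text == "" then (none, none)
  else
    let text_lower := PySem.Str.strip (PySem.Str.lower text)
    let text_tokens := PySem.Str.split₀ text_lower
    match pvALoop tokens text_tokens (PySem.List.pyRange 0 (tokens.length : Int) 1) with
    | some (a, b) => (some a, some b)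
    | none =>
      match text_tokens with
      | [] => (none, none)
      | first_word :: _ =>
        match pvAFall first_word (PySem.List.enumerate tokens 0) with
        | some (a, b) => (some a, some b)
        | none => (none, none)

-- ===== PORT B =====
-- fused 'for i, tok in enumerate(low)' pass with the fallback accumulator
def pvBLoop (lows : List String) (first : String) (rest : List String) (m : Int) :
    List (Int × String) → Option (Int × Int) → Option Int × Option Int
  | [], fallback =>
    match fallback with
    | some (a, b) => (some a, some b)
    | none => (none, none)
  | (i, tok) :: es, fallback =>
    if tok == first then
      if PySem.List.slice lows (some (i + 1)) (some (i + m)) == rest then (some i, some (i + m))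
      else pvBLoop lows first rest m es (if fallback.isNone then some (i, i + 1) else fallback)
    else pvBLoop lows first rest m es fallback

def find_span_in_tokens_alt (tokens : List String) (text : String) : Option Int × Option Int :=
  match PySem.Str.split₀ (PySem.Str.lower text) with
  | [] => (none, none)
  | first :: rest =>
    let lows := tokens.map PySem.Str.lower
    let m : Int := ((first :: rest).length : Int)
    pvBLoop lows first rest m (PySem.List.enumerate lows 0) none

-- ===== PRECONDITION & SPEC =====
def Spec_find_span_in_tokens (tokens : List String) (text : String) (out : Option Int × Option Int) : Prop := out = find_span_in_tokens_alt tokens text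
instance (tokens : List String) (text : String) (out : Option Int × Option Int) : Decidable (Spec_find_span_in_tokens tokens text out) := by unfold Spec_find_span_in_tokens; infer_instance

-- ===== CLAIM (what is proved, stated in full; the proofs are below) =====
def Claim_equal_find_span_in_tokens : Prop := ∀ (tokens : List String) (text : String), Dom_find_span_in_tokens tokens text → Spec_find_span_in_tokens tokens text (find_span_in_tokens tokens text)

-- ===== LEMMAS AND PROOFS =====

-- proof-only reference scan: full-window comparison at every index of the list
def pvScan (lows : List String) (pattern : List String) (m : Int) : List Int → Option (Int × Int)
  | [] => none
  | i :: rest =>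
    if PySem.List.slice lows (some i) (some (i + m)) == pattern then some (i, i + m)
    else pvScan lows pattern m rest

theorem pv_go_space (ws : List Char) (cur : List Char) (acc : List (List Char))
    (h : ws.all PySem.Chars.isspace = true) :
    PySem.Chars.split₀.go ws cur acc =
      if cur.isEmpty then acc.reverse else (cur.reverse :: acc).reverse := by
  induction ws generalizing cur acc with
  | nil => simp [PySem.Chars.split₀.go]
  | cons c rest ih =>
    simp only [List.all_cons, Bool.and_eq_true] at h
    simp only [PySem.Chars.split₀.go, h.1, if_true]
    by_cases hc : cur.isEmpty
    · simp [hc, ih _ _ h.2]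
    · simp [hc, ih _ _ h.2]

theorem pv_go_append_space (cs ws : List Char) (cur : List Char) (acc : List (List Char))
    (h : ws.all PySem.Chars.isspace = true) :
    PySem.Chars.split₀.go (cs ++ ws) cur acc = PySem.Chars.split₀.go cs cur acc := by
  induction cs generalizing cur acc with
  | nil => simp [pv_go_space ws cur acc h, PySem.Chars.split₀.go]
  | cons c rest ih =>
    simp only [List.cons_append, PySem.Chars.split₀.go]
    by_cases hc : PySem.Chars.isspace c
    · simp only [hc, if_true]
      by_cases hcur : cur.isEmpty <;> simp [hcur, ih]
    · simp [hc, ih]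

theorem pv_split₀_lstrip (cs : List Char) :
    PySem.Chars.split₀ (List.dropWhile PySem.Chars.isspace cs) = PySem.Chars.split₀ cs := by
  induction cs with
  | nil => rfl
  | cons c rest ih =>
    by_cases hc : PySem.Chars.isspace c
    · rw [List.dropWhile_cons_of_pos (by simpa using hc)]
      rw [ih]
      show _ = PySem.Chars.split₀.go (c :: rest) [] []
      simp [PySem.Chars.split₀.go, hc, PySem.Chars.split₀]
    · rw [List.dropWhile_cons_of_neg (by simpa using hc)]

theorem pv_split₀_strip (cs : List Char) :
    PySem.Chars.split₀ (PySem.Chars.strip cs) = PySem.Chars.split₀ cs := by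
  unfold PySem.Chars.strip PySem.Chars.rstrip PySem.Chars.lstrip
  set l := List.dropWhile PySem.Chars.isspace cs with hl
  have hdec : (List.dropWhile PySem.Chars.isspace l.reverse).reverse
      ++ (List.takeWhile PySem.Chars.isspace l.reverse).reverse = l := by
    rw [← List.reverse_append, List.takeWhile_append_dropWhile, List.reverse_reverse]
  have hws : ((List.takeWhile PySem.Chars.isspace l.reverse).reverse).all PySem.Chars.isspace = true := by
    simp only [List.all_reverse]
    exact List.all_takeWhile ..
  calc PySem.Chars.split₀ (List.dropWhile PySem.Chars.isspace l.reverse).reverse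
      = PySem.Chars.split₀.go ((List.dropWhile PySem.Chars.isspace l.reverse).reverse
          ++ (List.takeWhile PySem.Chars.isspace l.reverse).reverse) [] [] := by
        rw [PySem.Chars.split₀, pv_go_append_space _ _ _ _ hws]
    _ = PySem.Chars.split₀ l := by rw [hdec]; rfl
    _ = PySem.Chars.split₀ cs := pv_split₀_lstrip cs

theorem pv_go_ne_nil (cs : List Char) (cur : List Char) (acc : List (List Char))
    (h : cs.all PySem.Chars.isspace = false) :
    PySem.Chars.split₀.go cs cur acc ≠ [] := by
  induction cs generalizing cur acc with
  | nil => simp at h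
  | cons c rest ih =>
    simp only [List.all_cons, Bool.and_eq_false_iff] at h
    simp only [PySem.Chars.split₀.go]
    by_cases hc : PySem.Chars.isspace c
    · have hrest : rest.all PySem.Chars.isspace = false := by
        rcases h with h | h
        · simp [hc] at h
        · exact h
      by_cases hcur : cur.isEmpty <;> simp [hc, hcur, ih _ _ hrest]
    · simp only [hc]
      by_cases hrest : rest.all PySem.Chars.isspace
      · rw [pv_go_space rest (c :: cur) acc hrest]
        simp
      · exact ih _ _ (by simpa using hrest)

theorem pv_split₀_eq_nil_iff (cs : List Char) :
    PySem.Chars.split₀ cs = [] ↔ cs.all PySem.Chars.isspace = true := by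
  constructor
  · intro hnil
    by_contra hall
    exact pv_go_ne_nil cs [] [] (by simpa using hall) hnil
  · intro hall
    rw [PySem.Chars.split₀, pv_go_space cs [] [] hall]
    rfl

theorem pv_isspace_lowerChar (c : Char) :
    PySem.Chars.isspace (PySem.Chars.lowerChar c) = PySem.Chars.isspace c := by
  unfold PySem.Chars.lowerChar
  by_cases hu : PySem.Chars.isupper c
  · have hb : 'A' ≤ c ∧ c ≤ 'Z' := by
      simpa [PySem.Chars.isupper] using hu
    have hn : 65 ≤ c.toNat ∧ c.toNat ≤ 90 := ⟨hb.1, hb.2⟩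
    have hv : (c.toNat + 32).isValidChar := by left; omega
    have ht : (Char.ofNat (c.toNat + 32)).toNat = c.toNat + 32 := by
      simp [Char.ofNat, hv]
    have h2 : PySem.Chars.isspace (Char.ofNat (c.toNat + 32)) = false := by
      simp only [PySem.Chars.isspace, ht]
      simp only [Bool.or_eq_false_iff, Bool.and_eq_false_iff, decide_eq_false_iff_not,
        not_le]
      omega
    have h1 : PySem.Chars.isspace c = false := by
      simp only [PySem.Chars.isspace]
      simp only [Bool.or_eq_false_iff, Bool.and_eq_false_iff, decide_eq_false_iff_not,
        not_le]
      omega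
    simp [hu, h1, h2]
  · simp [hu]

theorem pv_strip_eq_nil_iff (cs : List Char) :
    PySem.Chars.strip cs = [] ↔ cs.all PySem.Chars.isspace = true := by
  unfold PySem.Chars.strip PySem.Chars.rstrip PySem.Chars.lstrip
  constructor
  · intro h
    have h1 : List.dropWhile PySem.Chars.isspace (List.dropWhile PySem.Chars.isspace cs).reverse = [] := by
      simpa using h
    rw [List.dropWhile_eq_nil_iff] at h1
    have h2 : List.dropWhile PySem.Chars.isspace cs = [] := by
      rcases hd : List.dropWhile PySem.Chars.isspace cs with _ | ⟨x, xs⟩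
      · rfl
      · exfalso
        have hx : ¬ PySem.Chars.isspace x := by
          have := List.head_dropWhile_not (p := PySem.Chars.isspace) (l := cs)
          simp [hd] at this
          simpa using this
        exact hx (h1 x (by simp [hd]))
    rw [List.dropWhile_eq_nil_iff] at h2
    simpa [List.all_eq_true] using h2
  · intro h
    have h2 : List.dropWhile PySem.Chars.isspace cs = [] := by
      rw [List.dropWhile_eq_nil_iff]
      intro x hx
      exact (List.all_eq_true.mp h) x hx
    simp [h2]

theorem pv_guard_iff (text : String) :
    (text == "" || PySem.Str.strip text == "") =
      (PySem.Str.split₀ (PySem.Str.lower text)).isEmpty := by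
  have hsp : ((PySem.Chars.lower text.toList).all PySem.Chars.isspace)
      = (text.toList.all PySem.Chars.isspace) := by
    unfold PySem.Chars.lower
    rw [List.all_map]
    congr 1
    funext c
    exact pv_isspace_lowerChar c
  have hright : (PySem.Str.split₀ (PySem.Str.lower text)).isEmpty
      = (text.toList.all PySem.Chars.isspace) := by
    rcases h : PySem.Str.split₀ (PySem.Str.lower text) with _ | ⟨x, xs⟩
    · have : PySem.Chars.split₀ (PySem.Str.lower text).toList = [] := by
        rw [← PySem.Str.split₀_map_toList, h]; rfl
      rw [PySem.Str.toList_lower] at this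
      rw [pv_split₀_eq_nil_iff] at this
      rw [hsp] at this
      simp [this]
    · have : PySem.Chars.split₀ (PySem.Str.lower text).toList ≠ [] := by
        rw [← PySem.Str.split₀_map_toList, h]; simp
      rw [PySem.Str.toList_lower] at this
      simp only [Ne, pv_split₀_eq_nil_iff, hsp] at this
      simp only [List.isEmpty_cons]
      simp only [Bool.not_eq_true] at this
      exact this.symm
  rw [hright]
  by_cases hall : text.toList.all PySem.Chars.isspace = true
  · have h1 : (PySem.Str.strip text).toList = [] := by
      rw [PySem.Str.toList_strip]
      exact (pv_strip_eq_nil_iff _).mpr hall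
    have h2 : PySem.Str.strip text = "" := String.toList_inj.mp (by simpa using h1)
    simp [h2, hall]
  · have h1 : PySem.Str.strip text ≠ "" := by
      intro hh
      apply hall
      apply (pv_strip_eq_nil_iff _).mp
      rw [← PySem.Str.toList_strip, hh]
      rfl
    have h2 : text ≠ "" := by
      intro hh
      subst hh
      exact hall rfl
    simp only [Bool.not_eq_true] at hall
    simp [h1, h2, hall]

theorem pv_patterns_eq (text : String) :
    PySem.Str.split₀ (PySem.Str.strip (PySem.Str.lower text)) =
      PySem.Str.split₀ (PySem.Str.lower text) := by
  have h : List.map String.toList (PySem.Str.split₀ (PySem.Str.strip (PySem.Str.lower text)))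
      = List.map String.toList (PySem.Str.split₀ (PySem.Str.lower text)) := by
    rw [PySem.Str.split₀_map_toList, PySem.Str.split₀_map_toList,
      PySem.Str.toList_strip, pv_split₀_strip]
  exact List.map_injective_iff.mpr (fun a b hab => String.toList_inj.mp hab) h

theorem pv_aMatch_eq (tokens : List String) (pat : List String) (i k : Nat) :
    pvAMatch tokens (i : Int) (PySem.List.enumerate pat (k : Int)) =
      decide ((List.take pat.length (List.drop (i + k) (tokens.map PySem.Str.lower))) = pat) := by
  induction pat generalizing k with
  | nil => simp [PySem.List.enumerate_nil, pvAMatch]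
  | cons p ps ih =>
    rw [PySem.List.enumerate_cons]
    show (if (i : Int) + (k : Int) ≥ (tokens.length : Int) then false
      else if PySem.Str.lower (PySem.List.pyGetD tokens ((i : Int) + (k : Int)) "") != p then false
      else pvAMatch tokens (i : Int) (PySem.List.enumerate ps ((k : Int) + 1))) = _
    by_cases hov : tokens.length ≤ i + k
    · have hd : List.drop (i + k) (tokens.map PySem.Str.lower) = [] := by
        apply List.drop_eq_nil_of_le
        simpa using hov
      rw [if_pos (by exact_mod_cast hov), hd]
      simp
    · rw [Nat.not_le] at hov
      rw [if_neg (by simp only [ge_iff_le, Int.not_le]; exact_mod_cast hov)]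
      have hik : (i : Int) + (k : Int) = ((i + k : Nat) : Int) := by push_cast; ring
      rw [hik, PySem.List.pyGetD_natCast]
      have hget : tokens.getD (i + k) "" = tokens[i + k]'hov := by
        simp [List.getD_eq_getElem?_getD, List.getElem?_eq_getElem hov]
      have hdrop : List.drop (i + k) (tokens.map PySem.Str.lower)
          = PySem.Str.lower (tokens[i + k]'hov) :: List.drop (i + k + 1) (tokens.map PySem.Str.lower) := by
        rw [List.drop_eq_getElem_cons (by simpa using hov)]
        simp
      rw [hget, hdrop]
      by_cases hne : PySem.Str.lower (tokens[i + k]'hov) = p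
      · rw [if_neg (by simp [hne])]
        have hcast : ((k : Int) + 1) = ((k + 1 : Nat) : Int) := by push_cast; ring
        rw [hcast, ih (k + 1)]
        have : i + (k + 1) = i + k + 1 := by omega
        rw [this]
        simp [hne]
      · rw [if_pos (by simp [hne])]
        simp [hne]

theorem pv_aFall_eq (f : String) (ts : List String) (k : Int) :
    pvAFall f (PySem.List.enumerate ts k) =
      (PySem.List.index? (ts.map PySem.Str.lower) f).map (fun (j : Nat) => (k + (j : Int), k + (j : Int) + 1)) := by
  induction ts generalizing k with
  | nil => simp [PySem.List.enumerate_nil, pvAFall, PySem.List.index?_eq_idxOf?]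
  | cons t ts ih =>
    rw [PySem.List.enumerate_cons]
    show (if PySem.Str.lower t == f then some (k, k + 1) else pvAFall f (PySem.List.enumerate ts (k + 1))) = _
    by_cases he : PySem.Str.lower t = f
    · rw [if_pos (by simp [he]), List.map_cons, he, PySem.List.index?_cons_self]
      simp
    · rw [if_neg (by simp [he]), List.map_cons, PySem.List.index?_cons_of_ne _ he, ih (k + 1)]
      cases PySem.List.index? (ts.map PySem.Str.lower) f with
      | none => simp
      | some j =>
        simp only [Option.map_some, Option.some.injEq, Prod.mk.injEq]
        constructor <;> (push_cast; ring)

theorem pv_loops_eq (tokens pat : List String) (l : List Int)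
    (h : ∀ x ∈ l, 0 ≤ x) :
    pvALoop tokens pat l =
      pvScan (tokens.map PySem.Str.lower) pat (pat.length : Int) l := by
  induction l with
  | nil => rfl
  | cons x xs ih =>
    have hx : 0 ≤ x := h x (by simp)
    obtain ⟨n, rfl⟩ : ∃ n : Nat, x = (n : Int) := ⟨x.toNat, by omega⟩
    show (if pvAMatch tokens (n : Int) (PySem.List.enumerate pat 0) then _ else _) = _
    have h0 : ((0 : Nat) : Int) = 0 := rfl
    rw [← h0, pv_aMatch_eq tokens pat n 0]
    show _ = (if PySem.List.slice (tokens.map PySem.Str.lower) (some (n : Int)) (some ((n : Int) + (pat.length : Int))) == pat then _ else _)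
    rw [PySem.List.slice_natCast_add]
    simp only [Nat.add_zero]
    by_cases hc : List.take pat.length (List.drop n (tokens.map PySem.Str.lower)) = pat
    · rw [if_pos (by simp [hc]), if_pos (by simp [hc])]
    · rw [if_neg (by simp [hc]), if_neg (by simp [hc])]
      exact ih (fun y hy => h y (by simp [hy]))

-- B's fused pass equals the reference full-window scan followed by the fallback lookup
theorem pv_bLoop_eq (L : List String) (first : String) (rest : List String)
    (n : Nat) (k : Nat) (fb : Option (Int × Int)) (hn : L.length - k = n) :
    pvBLoop L first rest ((rest.length : Int) + 1) (PySem.List.enumerate (List.drop k L) (k : Int)) fb =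
      match pvScan L (first :: rest) ((rest.length : Int) + 1) (PySem.List.pyRange (k : Int) (L.length : Int) 1) with
      | some (a, b) => (some a, some b)
      | none =>
        match fb with
        | some (a, b) => (some a, some b)
        | none =>
          match PySem.List.index? (List.drop k L) first with
          | some j => (some ((k : Int) + (j : Int)), some ((k : Int) + (j : Int) + 1))
          | none => (none, none) := by
  induction n generalizing k fb with
  | zero =>
    have hk : L.length ≤ k := by omega
    rw [List.drop_eq_nil_of_le hk, PySem.List.pyRange_one_eq_nil (by exact_mod_cast hk)]
    simp only [PySem.List.enumerate_nil, pvBLoop, pvScan, PySem.List.index?_eq_idxOf?]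
    cases fb with
    | none => rfl
    | some p => rcases p with ⟨a, b⟩; rfl
  | succ n ih =>
    have hk : k < L.length := by omega
    have hdrop : List.drop k L = L[k] :: List.drop (k + 1) L := List.drop_eq_getElem_cons hk
    rw [hdrop, PySem.List.enumerate_cons,
      PySem.List.pyRange_one_cons (by exact_mod_cast hk)]
    have hcast1 : (k : Int) + 1 = ((k + 1 : Nat) : Int) := by push_cast; ring
    -- the two slices in play, as take/drop
    have hsliceB : PySem.List.slice L (some ((k : Int) + 1)) (some ((k : Int) + ((rest.length : Int) + 1)))
        = List.take rest.length (List.drop (k + 1) L) := by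
      have : (k : Int) + ((rest.length : Int) + 1) = ((k + 1 : Nat) : Int) + (rest.length : Int) := by
        push_cast; ring
      rw [this, hcast1, PySem.List.slice_natCast_add]
    have hsliceS : PySem.List.slice L (some (k : Int)) (some ((k : Int) + ((rest.length : Int) + 1)))
        = List.take (rest.length + 1) (List.drop k L) := by
      have : (k : Int) + ((rest.length : Int) + 1) = (k : Int) + ((rest.length + 1 : Nat) : Int) := by
        push_cast; ring
      rw [this, PySem.List.slice_natCast_add]
    have hwin : List.take (rest.length + 1) (List.drop k L)
        = L[k] :: List.take rest.length (List.drop (k + 1) L) := by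
      rw [hdrop]; rfl
    show (if L[k] == first then
        if PySem.List.slice L (some ((k : Int) + 1)) (some ((k : Int) + ((rest.length : Int) + 1))) == rest
        then (some (k : Int), some ((k : Int) + ((rest.length : Int) + 1)))
        else pvBLoop L first rest ((rest.length : Int) + 1)
          (PySem.List.enumerate (List.drop (k + 1) L) ((k : Int) + 1))
          (if fb.isNone then some ((k : Int), (k : Int) + 1) else fb)
      else pvBLoop L first rest ((rest.length : Int) + 1)
        (PySem.List.enumerate (List.drop (k + 1) L) ((k : Int) + 1)) fb) = _
    show _ = (match (if PySem.List.slice L (some (k : Int)) (some ((k : Int) + ((rest.length : Int) + 1))) == (first :: rest)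
        then some ((k : Int), (k : Int) + ((rest.length : Int) + 1))
        else pvScan L (first :: rest) ((rest.length : Int) + 1) (PySem.List.pyRange ((k : Int) + 1) (L.length : Int) 1)) with
      | some (a, b) => (some a, some b)
      | none =>
        match fb with
        | some (a, b) => (some a, some b)
        | none =>
          match PySem.List.index? (L[k] :: List.drop (k + 1) L) first with
          | some j => (some ((k : Int) + (j : Int)), some ((k : Int) + (j : Int) + 1))
          | none => (none, none))
    rw [hsliceB, hsliceS, hwin]
    by_cases hfst : L[k] = first
    · have hok : ((L[k] == first) = true) := by simp [hfst]
      rw [if_pos hok]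
      by_cases htl : List.take rest.length (List.drop (k + 1) L) = rest
      · have h1 : ((List.take rest.length (List.drop (k + 1) L) == rest) = true) := by simp [htl]
        have h2 : (((L[k] :: List.take rest.length (List.drop (k + 1) L)) == (first :: rest)) = true) := by
          simp [hfst, htl]
        rw [if_pos h1, if_pos h2]
      · have h1 : ¬ ((List.take rest.length (List.drop (k + 1) L) == rest) = true) := by simp [htl]
        have h2 : ¬ (((L[k] :: List.take rest.length (List.drop (k + 1) L)) == (first :: rest)) = true) := by
          simp [htl]
        rw [if_neg h1, if_neg h2, hcast1, ih (k + 1) _ (by omega)]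
        rw [← hcast1]
        have hidx : PySem.List.index? (L[k] :: List.drop (k + 1) L) first = some 0 := by
          rw [hfst, PySem.List.index?_cons_self]
        cases hscan : pvScan L (first :: rest) ((rest.length : Int) + 1)
            (PySem.List.pyRange ((k : Int) + 1) (L.length : Int) 1) with
        | some p => rcases p with ⟨a, b⟩; cases fb <;> rfl
        | none =>
          cases fb with
          | some p => rcases p with ⟨a, b⟩; rfl
          | none =>
            rw [hidx]
            simp
    · have hok : ¬ ((L[k] == first) = true) := by simp [hfst]
      have h2 : ¬ (((L[k] :: List.take rest.length (List.drop (k + 1) L)) == (first :: rest)) = true) := by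
        simp [hfst]
      rw [if_neg hok, if_neg h2, hcast1, ih (k + 1) _ (by omega), ← hcast1]
      rw [PySem.List.index?_cons_of_ne _ hfst]
      cases pvScan L (first :: rest) ((rest.length : Int) + 1)
          (PySem.List.pyRange ((k : Int) + 1) (L.length : Int) 1) with
      | some p => rcases p with ⟨a, b⟩; rfl
      | none =>
        cases fb with
        | some p => rcases p with ⟨a, b⟩; rfl
        | none =>
          cases PySem.List.index? (List.drop (k + 1) L) first with
          | none => rfl
          | some j =>
            simp only [Option.map_some, Prod.mk.injEq, Option.some.injEq]
            constructor <;> (push_cast; ring)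

theorem pv_main (tokens : List String) (text : String) :
    find_span_in_tokens tokens text = find_span_in_tokens_alt tokens text := by
  simp only [find_span_in_tokens, find_span_in_tokens_alt]
  rw [pv_patterns_eq text]
  rcases hp : PySem.Str.split₀ (PySem.Str.lower text) with _ | ⟨first, rest⟩
  · rw [if_pos (by rw [pv_guard_iff text, hp]; rfl)]
  · rw [if_neg (by rw [pv_guard_iff text, hp]; simp)]
    set L := tokens.map PySem.Str.lower with hL
    have hlen : L.length = tokens.length := by rw [hL]; simp
    have hm : ((first :: rest).length : Int) = (rest.length : Int) + 1 := by
      push_cast [List.length_cons]; ring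
    have hA : pvALoop tokens (first :: rest) (PySem.List.pyRange 0 (tokens.length : Int) 1)
        = pvScan L (first :: rest) ((rest.length : Int) + 1) (PySem.List.pyRange 0 (L.length : Int) 1) := by
      rw [pv_loops_eq tokens (first :: rest) _
        (fun x hx => (PySem.List.mem_pyRange_one.mp hx).1), hm, hlen]
    have hB := pv_bLoop_eq L first rest L.length 0 none rfl
    simp only [List.drop_zero, Nat.cast_zero] at hB
    show (match pvALoop tokens (first :: rest) (PySem.List.pyRange 0 (tokens.length : Int) 1) with
      | some (a, b) => (some a, some b)
      | none =>
        match pvAFall first (PySem.List.enumerate tokens 0) with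
        | some (a, b) => (some a, some b)
        | none => (none, none)) =
      pvBLoop L first rest ((first :: rest).length : Int) (PySem.List.enumerate L 0) none
    rw [hm, hB, hA, pv_aFall_eq first tokens 0]
    cases pvScan L (first :: rest) ((rest.length : Int) + 1) (PySem.List.pyRange 0 (L.length : Int) 1) with
    | some p => rcases p with ⟨a, b⟩; rfl
    | none =>
      rw [← hL]
      cases PySem.List.index? L first with
      | none => rfl
      | some j => simp

-- ===== VERDICT (by name: the statement is the Claim_ definition above) =====
theorem find_span_in_tokens_spec : Claim_equal_find_span_in_tokens := by
  intro tokens text _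
  exact pv_main tokens text
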